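-- pv_equiv track=rewrite | github.com/naxoruto/Limonchero-3D | backend/npc_prompts.py | check_barry_confession_gate
-- ===== SOURCE A (Python) =====
-- BARRY_REQUIRED_EVIDENCE = {"F1", "F2", "F3"}
--
-- def check_barry_confession_gate(history: list[dict]) -> bool:
--     """
--     Escanea el historial buscando markers de evidencia presentada.
--     Marker esperado: "[EVIDENCE_PRESENTED:F1]" etc, inyectado por Godot.
--     Retorna True si las 3 pruebas están presentes.
--     """
--     presented = set()
--     for msg in history:
--         content = msg.get("content", "")
--         for fact in BARRY_REQUIRED_EVIDENCE:
--             if f"[EVIDENCE_PRESENTED:{fact}]" in content: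
--                 presented.add(fact)
--     return BARRY_REQUIRED_EVIDENCE.issubset(presented)
-- ===== SOURCE B (Python) =====
-- BARRY_REQUIRED_EVIDENCE = {"F1", "F2", "F3"}
--
-- def check_barry_confession_gate(history: list[dict]) -> bool:
--     """Flattens the whole history once into a single newline-joined transcript,
--     then tests each required marker against that one string. Correct because no
--     marker contains a newline, so a marker can never straddle the inserted
--     separator: it occurs in the transcript iff it occurs in some message."""
--     transcript = "\n".join(msg.get("content", "") for msg in history)
--     return all(f"[EVIDENCE_PRESENTED:{fact}]" in transcript
--                for fact in BARRY_REQUIRED_EVIDENCE)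
-- ===== Notes on version B (the rewrite author's own statement) =====
-- stated objective: alternative
-- what changed: Instead of accumulating a 'presented' set while testing every marker against every message, B first flattens the history into one newline-joined transcript string and then performs three substring tests on that single string; correct since markers contain no newline and so cannot straddle the separator.
import Mathlib
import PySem

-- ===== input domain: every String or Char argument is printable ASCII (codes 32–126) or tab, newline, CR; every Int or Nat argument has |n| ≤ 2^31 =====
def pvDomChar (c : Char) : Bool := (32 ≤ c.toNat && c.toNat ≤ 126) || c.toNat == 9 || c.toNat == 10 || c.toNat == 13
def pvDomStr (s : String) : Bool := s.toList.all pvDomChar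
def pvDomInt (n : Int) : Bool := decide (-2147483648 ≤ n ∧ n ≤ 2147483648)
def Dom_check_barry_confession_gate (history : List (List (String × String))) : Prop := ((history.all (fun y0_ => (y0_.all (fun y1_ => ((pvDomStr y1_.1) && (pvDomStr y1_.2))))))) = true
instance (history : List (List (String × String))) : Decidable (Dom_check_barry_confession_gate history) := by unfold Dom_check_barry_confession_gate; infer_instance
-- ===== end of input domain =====

-- B replaces A's per-message/per-fact accumulating pass over a mutable 'presented' set
-- by one newline-joined transcript of the history followed by three substring tests;
-- objective: alternative (same asymptotic cost, different data organisation).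

-- ===== PORT A =====
-- BARRY_REQUIRED_EVIDENCE = {"F1","F2","F3"} — a set of distinct literals; the results of
-- membership/issubset/all over it are iteration-order independent, so a fixed list is exact.
def barryRequiredEvidence : PySem.Set String := PySem.Set.ofList ["F1", "F2", "F3"]

def barryMarker (fact : String) : String := "[EVIDENCE_PRESENTED:" ++ fact ++ "]"

-- msg.get("content", "") — a Python dict is the assoc list msg read through PySem.Dict
def msgContent (msg : List (String × String)) : String := PySem.Dict.getD (PySem.Dict.mk msg) "content" ""

def check_barry_confession_gate (history : List (List (String × String))) : Bool :=
  let presented : PySem.Set String :=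
    history.foldl (fun presented msg =>
      let content := msgContent msg
      barryRequiredEvidence.foldl (fun presented fact =>
        if PySem.Str.isIn (barryMarker fact) content then PySem.Set.add presented fact
        else presented) presented)
      PySem.Set.empty
  PySem.Set.issubset barryRequiredEvidence presented

-- ===== PORT B =====
def check_barry_confession_gate_alt (history : List (List (String × String))) : Bool :=
  let transcript : String := PySem.Str.join "\n" (history.map msgContent)
  barryRequiredEvidence.all (fun fact => PySem.Str.isIn (barryMarker fact) transcript)

-- ===== PRECONDITION & SPEC =====
def Spec_check_barry_confession_gate (history : List (List (String × String))) (out : Bool) : Prop := out = check_barry_confession_gate_alt history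
instance (history : List (List (String × String))) (out : Bool) : Decidable (Spec_check_barry_confession_gate history out) := by unfold Spec_check_barry_confession_gate; infer_instance

-- ===== CLAIM (what is proved, stated in full; the proofs are below) =====
def Claim_equal_check_barry_confession_gate : Prop := ∀ (history : List (List (String × String))), Dom_check_barry_confession_gate history → Spec_check_barry_confession_gate history (check_barry_confession_gate history)

-- ===== LEMMAS AND PROOFS =====

-- A's side: one message step — membership after the inner fold over the fact list.
lemma mem_inner_fold (facts : List String) (p : PySem.Set String) (c : String) (f : String) :
    f ∈ facts.foldl (fun p fact =>
        if PySem.Str.isIn (barryMarker fact) c then PySem.Set.add p fact else p) p ↔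
      f ∈ p ∨ (f ∈ facts ∧ PySem.Str.isIn (barryMarker f) c = true) := by
  induction facts generalizing p with
  | nil => simp
  | cons g gs ih =>
    simp only [List.foldl_cons]
    by_cases hin : PySem.Str.isIn (barryMarker g) c = true
    · simp only [hin, if_true, ih, PySem.Set.mem_add, List.mem_cons]
      constructor
      · rintro (⟨hp | rfl⟩ | ⟨hm, hi⟩)
        · exact Or.inl hp
        · exact Or.inr ⟨Or.inl rfl, hin⟩
        · exact Or.inr ⟨Or.inr hm, hi⟩
      · rintro (hp | ⟨(rfl | hm), hi⟩)
        · exact Or.inl (Or.inl hp)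
        · exact Or.inl (Or.inr rfl)
        · exact Or.inr ⟨hm, hi⟩
    · simp only [hin, if_false, Bool.false_eq_true, ih, List.mem_cons]
      constructor
      · rintro (hp | ⟨hm, hi⟩)
        · exact Or.inl hp
        · exact Or.inr ⟨Or.inr hm, hi⟩
      · rintro (hp | ⟨(rfl | hm), hi⟩)
        · exact Or.inl hp
        · exact absurd hi hin
        · exact Or.inr ⟨hm, hi⟩

-- A's whole pass: f is in 'presented' iff it is a required fact whose marker occurs somewhere.
lemma mem_outer_fold (history : List (List (String × String))) (init : PySem.Set String) (f : String) :
    f ∈ history.foldl (fun presented msg =>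
        barryRequiredEvidence.foldl (fun presented fact =>
          if PySem.Str.isIn (barryMarker fact) (msgContent msg) then
            PySem.Set.add presented fact
          else presented) presented) init ↔
      f ∈ init ∨ (f ∈ barryRequiredEvidence ∧
        history.any (fun msg =>
          PySem.Str.isIn (barryMarker f) (msgContent msg)) = true) := by
  induction history generalizing init with
  | nil => simp
  | cons msg rest ih =>
    simp only [List.foldl_cons, ih, mem_inner_fold, List.any_cons, Bool.or_eq_true]
    tauto

-- B's side: an occurrence of a separator-free pattern in a ++ x :: b lies wholly in a or in b.
lemma infix_append_sep {p a b : List Char} {x : Char} (hx : x ∉ p) :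
    p <:+: a ++ x :: b ↔ p <:+: a ∨ p <:+: b := by
  constructor
  · rintro ⟨s, t, hst⟩
    by_cases h1 : s.length + p.length ≤ a.length
    · left
      have hpre : s ++ p <+: a ++ x :: b := ⟨t, by simpa using hst⟩
      have ha : a <+: a ++ x :: b := List.prefix_append _ _
      have hsp : s ++ p <+: a :=
        List.prefix_of_prefix_length_le hpre ha (by simpa using h1)
      exact ((List.suffix_append s p).isInfix).trans hsp.isInfix
    · by_cases h2 : a.length + 1 ≤ s.length
      case pos =>
        right
        have hlen : s.length + (p.length + t.length) = a.length + (b.length + 1) := by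
          have := congrArg List.length hst
          simpa using this
        have hsuf : p ++ t <:+ a ++ x :: b := ⟨s, by simpa using hst⟩
        have hb : x :: b <:+ a ++ x :: b := List.suffix_append _ _
        rcases List.suffix_or_suffix_of_suffix hsuf hb with hcase | hcase
        · obtain ⟨u, hu⟩ := hcase
          match u, hu with
          | [], hu =>
            exfalso
            have := congrArg List.length hu
            simp at this
            omega
          | y :: u', hu =>
            have hb' : u' ++ (p ++ t) = b := by
              have h3 := hu
              simp only [List.cons_append] at h3
              exact (List.cons.injEq _ _ _ _ ▸ h3).2
            exact ⟨u', t, by rw [← hb']; simp⟩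
        · exfalso
          have := hcase.length_le
          simp at this
          omega
      case neg =>
        exfalso
        apply hx
        have hip : a.length - s.length < p.length := by omega
        have hia : a.length < (s ++ p ++ t).length := by
          have := congrArg List.length hst
          simp at this ⊢
          omega
        have e1 : (s ++ p ++ t)[a.length]'hia = x := by
          rw [List.getElem_of_eq hst]
          rw [List.getElem_append_right (by omega)]
          simp
        have e2 : (s ++ p ++ t)[a.length]'hia = p[a.length - s.length]'hip := by
          rw [List.getElem_append_left (by simp; omega),
              List.getElem_append_right (by omega)]
        rw [← e1, e2]
        exact List.getElem_mem _
  · rintro (h | h)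
    · exact h.trans (List.prefix_append _ _).isInfix
    · exact (h.trans (List.suffix_cons x b).isInfix).trans (List.suffix_append a _).isInfix

-- B's side: a nonempty newline-free pattern occurs in the "\n"-joined pieces
-- iff it occurs in one of the pieces.
lemma infix_join_newline (p : List Char) (hp : p ≠ []) (hx : '\n' ∉ p)
    (cs : List (List Char)) :
    p <:+: PySem.Chars.join ['\n'] cs ↔ ∃ c ∈ cs, p <:+: c := by
  induction cs with
  | nil => simp [PySem.Chars.join_nil, List.infix_nil, hp]
  | cons c rest ih =>
    match rest, ih with
    | [], _ => simp [PySem.Chars.join_singleton]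
    | d :: rest', ih =>
      rw [PySem.Chars.join_cons_cons]
      have : c ++ ['\n'] ++ PySem.Chars.join ['\n'] (d :: rest')
          = c ++ '\n' :: PySem.Chars.join ['\n'] (d :: rest') := by simp
      rw [this, infix_append_sep hx, ih]
      simp

-- Per fact: the marker is in the transcript iff it is in some message's content.
lemma isIn_transcript (f : String) (hx : '\n' ∉ f.toList)
    (history : List (List (String × String))) :
    PySem.Str.isIn (barryMarker f) (PySem.Str.join "\n" (history.map msgContent)) =
      history.any (fun msg => PySem.Str.isIn (barryMarker f) (msgContent msg)) := by
  rw [Bool.eq_iff_iff, PySem.Str.isIn_iff_infix, PySem.Str.toList_join]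
  have hnl : '\n' ∉ (barryMarker f).toList := by
    simp only [barryMarker, String.toList_append, List.mem_append]
    rintro ((h | h) | h)
    · revert h; decide
    · exact hx h
    · revert h; decide
  have hne : (barryMarker f).toList ≠ [] := by
    simp [barryMarker, String.toList_append]
  rw [show ("\n" : String).toList = ['\n'] from rfl,
      infix_join_newline _ hne hnl, List.any_eq_true]
  constructor
  · rintro ⟨c, hc, hinf⟩
    obtain ⟨msg, hmsg, rfl⟩ := by
      simpa only [List.map_map, List.mem_map] using hc
    exact ⟨msg, hmsg, (PySem.Str.isIn_iff_infix _ _).2 hinf⟩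
  · rintro ⟨msg, hmsg, hin⟩
    refine ⟨(msgContent msg).toList, ?_, (PySem.Str.isIn_iff_infix _ _).1 hin⟩
    simp only [List.map_map, List.mem_map]
    exact ⟨msg, hmsg, rfl⟩

-- The three concrete facts contain no newline.
lemma fact_no_newline (f : String) (hf : f ∈ barryRequiredEvidence) : '\n' ∉ f.toList := by
  have hf' : f = "F1" ∨ f = "F2" ∨ f = "F3" := by
    simpa [barryRequiredEvidence, PySem.Set.mem_ofList] using hf
  rcases hf' with rfl | rfl | rfl <;> decide

-- ===== VERDICT (by name: the statement is the Claim_ definition above) =====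
theorem check_barry_confession_gate_spec : Claim_equal_check_barry_confession_gate := by
  intro history _
  show check_barry_confession_gate history = check_barry_confession_gate_alt history
  unfold check_barry_confession_gate check_barry_confession_gate_alt
  rw [Bool.eq_iff_iff, PySem.Set.issubset_iff, List.all_eq_true]
  constructor
  · intro h f hf
    have hmem := h f hf
    rw [mem_outer_fold] at hmem
    rcases hmem with h0 | ⟨_, hany⟩
    · simp [PySem.Set.empty] at h0
    · rw [isIn_transcript f (fact_no_newline f hf) history]
      exact hany
  · intro h f hf
    rw [mem_outer_fold]
    refine Or.inr ⟨hf, ?_⟩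
    rw [← isIn_transcript f (fact_no_newline f hf) history]
    exact h f hf
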